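-- pv_equiv track=rewrite | github.com/ABOBA-2006/Homeworks-Classworks | main2.py | founding
-- ===== SOURCE A (Python) =====
-- def founding(b):
--     maximum = ''
--     for i in b:
--         flag = i
--         left = b.find(flag)
--         right = b.rfind(flag)
--         if len(b[left:right+1]) > len(maximum) and len(b[left:right+1]) > 1:
--             maximum = b[left:right+1]
--     return maximum
-- ===== SOURCE B (Python) =====
-- def founding(b):
--     first = {}
--     last = {}
--     for i, c in enumerate(b):
--         first.setdefault(c, i)
--         last[c] = i
--     best_len = 1
--     best = ''
--     for c in first:
--         span = last[c] - first[c] + 1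
--         if span > best_len:
--             best_len = span
--             best = b[first[c]:last[c] + 1]
--     return best
-- ===== Notes on version B (the rewrite author's own statement) =====
-- stated objective: faster
-- what changed: Instead of calling find/rfind (each an O(n) scan) for every character of the string, B records the first and last index of every character in one enumerate pass into two dicts and then picks the longest span over the distinct characters.
import Mathlib
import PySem

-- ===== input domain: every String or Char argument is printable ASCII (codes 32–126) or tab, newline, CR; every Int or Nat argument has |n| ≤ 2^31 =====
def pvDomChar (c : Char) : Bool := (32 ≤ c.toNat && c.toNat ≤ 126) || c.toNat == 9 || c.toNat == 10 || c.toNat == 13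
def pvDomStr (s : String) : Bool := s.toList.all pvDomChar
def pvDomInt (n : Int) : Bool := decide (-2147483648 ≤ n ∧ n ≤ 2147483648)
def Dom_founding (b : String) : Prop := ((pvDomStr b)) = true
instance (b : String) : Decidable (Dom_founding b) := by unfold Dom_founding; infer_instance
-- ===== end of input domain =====

-- B replaces A's per-character find/rfind scans with one enumerate pass building first/last
-- index dicts plus a single scan over the distinct characters (objective: faster).

-- ===== PORT A =====
-- one iteration of A's loop body (flag = i; left = b.find(flag); right = b.rfind(flag); …)
def foundingStep (b maximum : String) (i : Char) : String :=
  let flag : String := String.ofList [i]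
  let left := PySem.Str.find b flag
  let right := PySem.Str.rfind b flag
  if PySem.Str.len (PySem.Str.slice b (some left) (some (right + 1))) > PySem.Str.len maximum ∧
     PySem.Str.len (PySem.Str.slice b (some left) (some (right + 1))) > 1 then
    PySem.Str.slice b (some left) (some (right + 1))
  else maximum

def founding (b : String) : String :=
  b.toList.foldl (foundingStep b) ""

-- ===== PORT B =====
-- one iteration of B's first loop: first.setdefault(c, i); last[c] = i
def foundingFill (p : PySem.Dict Char Int × PySem.Dict Char Int) (ic : Int × Char) :
    PySem.Dict Char Int × PySem.Dict Char Int :=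
  (p.1.setdefault ic.2 ic.1, p.2.insert ic.2 ic.1)

-- one iteration of B's second loop (c is always a key of both dicts, so Python's
-- first[c] / last[c] never raise; getD … 0 is exact on the keys iterated)
def foundingBest (b : String) (fl : PySem.Dict Char Int × PySem.Dict Char Int)
    (st : Int × String) (c : Char) : Int × String :=
  let span := fl.2.getD c 0 - fl.1.getD c 0 + 1
  if span > st.1 then
    (span, PySem.Str.slice b (some (fl.1.getD c 0)) (some (fl.2.getD c 0 + 1)))
  else st

def founding_alt (b : String) : String :=
  let fl := (PySem.List.enumerate b.toList 0).foldl foundingFill (PySem.Dict.empty, PySem.Dict.empty)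
  (fl.1.keys.foldl (foundingBest b fl) (1, "")).2

-- ===== PRECONDITION & SPEC =====
def Spec_founding (b : String) (out : String) : Prop := out = founding_alt b
instance (b : String) (out : String) : Decidable (Spec_founding b out) := by unfold Spec_founding; infer_instance

-- ===== CLAIM (what is proved, stated in full; the proofs are below) =====
def Claim_equal_founding : Prop := ∀ (b : String), Dom_founding b → Spec_founding b (founding b)

-- ===== LEMMAS AND PROOFS =====

-- index of the first occurrence of c (meaningful when c ∈ s)
def firstN : List Char → Char → Nat
  | [], _ => 0
  | x :: t, c => if x = c then 0 else firstN t c + 1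

-- index of the last occurrence of c (meaningful when c ∈ s)
def lastN : List Char → Char → Nat
  | [], _ => 0
  | x :: t, c => if c ∈ t then lastN t c + 1 else 0

theorem firstN_get {s : List Char} {c : Char} (h : c ∈ s) : s[firstN s c]? = some c := by
  induction s with
  | nil => cases h
  | cons x t ih =>
    by_cases hx : x = c
    · simp [firstN, hx]
    · have : c ∈ t := by cases h with | head => exact absurd rfl hx | tail _ h => exact h
      simp [firstN, hx, ih this]

theorem firstN_min {s : List Char} {c : Char} {j : Nat} (h : s[j]? = some c) : firstN s c ≤ j := by
  induction s generalizing j with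
  | nil => simp at h
  | cons x t ih =>
    cases j with
    | zero => simp_all [firstN]
    | succ j =>
      simp only [List.getElem?_cons_succ] at h
      by_cases hx : x = c
      · simp [firstN, hx]
      · simpa [firstN, hx, Nat.succ_le_succ_iff] using ih h

theorem lastN_get {s : List Char} {c : Char} (h : c ∈ s) : s[lastN s c]? = some c := by
  induction s with
  | nil => cases h
  | cons x t ih =>
    by_cases ht : c ∈ t
    · simp [lastN, ht, ih ht]
    · have hx : x = c := by cases h with | head => rfl | tail _ h => exact absurd h ht
      simp [lastN, ht, hx]

theorem lastN_max {s : List Char} {c : Char} {j : Nat} (h : s[j]? = some c) : j ≤ lastN s c := by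
  induction s generalizing j with
  | nil => simp at h
  | cons x t ih =>
    cases j with
    | zero => simp
    | succ j =>
      simp only [List.getElem?_cons_succ] at h
      have hm : c ∈ t := List.mem_of_getElem? h
      simpa [lastN, hm, Nat.succ_le_succ_iff] using ih h

theorem lastN_lt {s : List Char} {c : Char} (h : c ∈ s) : lastN s c < s.length :=
  (List.getElem?_eq_some_iff.mp (lastN_get h)).1

theorem firstN_le_lastN {s : List Char} {c : Char} (h : c ∈ s) : firstN s c ≤ lastN s c :=
  firstN_min (lastN_get h)

theorem prefix_single_iff {c : Char} {l : List Char} : [c] <+: l ↔ l.head? = some c := by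
  cases l with
  | nil => simp
  | cons x t =>
    constructor
    · rintro ⟨r, hr⟩; simp at hr; simp [hr.1]
    · intro h; simp at h; exact ⟨t, by simp [h]⟩

theorem isPrefixOf_single_iff {c : Char} {l : List Char} :
    [c].isPrefixOf l = true ↔ l.head? = some c := by
  rw [List.isPrefixOf_iff_prefix]; exact prefix_single_iff

theorem infix_single {s : List Char} {c : Char} (h : c ∈ s) : [c] <:+: s := by
  obtain ⟨l1, l2, rfl⟩ := List.append_of_mem h
  exact ⟨l1, l2, by simp⟩

theorem find_single {s : List Char} {c : Char} (h : c ∈ s) :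
    PySem.Chars.find s [c] = (firstN s c : Int) := by
  have h0 : 0 ≤ PySem.Chars.find s [c] := (PySem.Chars.find_nonneg_iff s [c]).mpr (infix_single h)
  obtain ⟨h1, h2⟩ := PySem.Chars.find_spec h0
  have hg : s[(PySem.Chars.find s [c]).toNat]? = some c := by
    rw [← List.head?_drop]; exact prefix_single_iff.mp h1
  have hle : firstN s c ≤ (PySem.Chars.find s [c]).toNat := firstN_min hg
  have hge : ¬ firstN s c < (PySem.Chars.find s [c]).toNat := by
    intro hlt
    exact h2 _ hlt (prefix_single_iff.mpr (by rw [List.head?_drop]; exact firstN_get h))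
  omega

theorem rfind_go_spec {s : List Char} {c : Char} (h : c ∈ s) :
    ∀ n, lastN s c ≤ n → PySem.Chars.rfind.go s [c] n = (lastN s c : Int) := by
  intro n
  induction n with
  | zero =>
    intro hn
    have h0 : lastN s c = 0 := Nat.le_zero.mp hn
    have hg : s[(0:Nat)]? = some c := h0 ▸ lastN_get h
    have hred : PySem.Chars.rfind.go s [c] 0 =
        if [c].isPrefixOf s = true then (0 : Int) else -1 := by
      rw [PySem.Chars.rfind.go.eq_def]
    rw [hred, if_pos (isPrefixOf_single_iff.mpr (by rw [List.head?_eq_getElem?]; exact hg))]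
    simp [h0]
  | succ n ih =>
    intro hn
    have hred : PySem.Chars.rfind.go s [c] (n + 1) =
        if [c].isPrefixOf (List.drop (n + 1) s) = true then ((n + 1 : Nat) : Int)
        else PySem.Chars.rfind.go s [c] n := by
      rw [PySem.Chars.rfind.go.eq_def]
    rw [hred]
    by_cases he : lastN s c = n + 1
    · have hg : s[n+1]? = some c := he ▸ lastN_get h
      rw [if_pos (isPrefixOf_single_iff.mpr (by rw [List.head?_drop]; exact hg))]
      rw [he]
    · have hlt : lastN s c ≤ n := by omega
      have hng : ¬ [c].isPrefixOf (List.drop (n+1) s) = true := by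
        intro hp
        have : s[n+1]? = some c := by rw [← List.head?_drop]; exact isPrefixOf_single_iff.mp hp
        have := lastN_max this
        omega
      rw [if_neg hng]
      exact ih hlt

theorem rfind_single {s : List Char} {c : Char} (h : c ∈ s) :
    PySem.Chars.rfind s [c] = (lastN s c : Int) :=
  rfind_go_spec h s.length (Nat.le_of_lt (lastN_lt h))

-- the segment A extracts for character c
def segA (b : String) (c : Char) : String :=
  PySem.Str.slice b (some (PySem.Str.find b (String.ofList [c])))
    (some (PySem.Str.rfind b (String.ofList [c]) + 1))

theorem foundingStep_eq (b m : String) (c : Char) :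
    foundingStep b m c =
      if PySem.Str.len (segA b c) > PySem.Str.len m ∧ PySem.Str.len (segA b c) > 1 then segA b c
      else m := rfl

-- the same segment via firstN/lastN
def segC (b : String) (c : Char) : String :=
  PySem.Str.slice b (some (firstN b.toList c : Int)) (some ((lastN b.toList c : Int) + 1))

theorem segA_eq_segC {b : String} {c : Char} (h : c ∈ b.toList) : segA b c = segC b c := by
  unfold segA segC
  have hf : PySem.Str.find b (String.ofList [c]) = (firstN b.toList c : Int) := by
    simpa [PySem.Str.find] using find_single h
  have hr : PySem.Str.rfind b (String.ofList [c]) = (lastN b.toList c : Int) := by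
    simpa [PySem.Str.rfind] using rfind_single h
  rw [hf, hr]

theorem len_segC {b : String} {c : Char} (h : c ∈ b.toList) :
    PySem.Str.len (segC b c) = (lastN b.toList c : Int) - (firstN b.toList c : Int) + 1 := by
  unfold segC PySem.Str.len PySem.Str.slice
  have hcast : ((lastN b.toList c : Int) + 1) = ((lastN b.toList c + 1 : Nat) : Int) := by
    push_cast; ring
  rw [hcast]
  simp only [PySem.Chars.slice_eq_listSlice, PySem.List.slice_natCast]
  have h1 := lastN_lt h
  have h2 := firstN_le_lastN h
  have hbl : b.length = b.toList.length := rfl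
  simp [List.length_take, List.length_drop]
  omega

-- ---- dict lemmas -------------------------------------------------------------

theorem contains_eq_keys_contains (d : PySem.Dict Char Int) (x : Char) :
    d.contains x = d.keys.contains x := by
  by_cases h : x ∈ d.keys
  · rw [(PySem.Dict.contains_iff_mem_keys d x).mpr h, List.contains_iff_mem.mpr h]
  · rw [Bool.eq_false_iff.mpr (fun hc => h ((PySem.Dict.contains_iff_mem_keys d x).mp hc)),
        Bool.eq_false_iff.mpr (fun hc => h (List.contains_iff_mem.mp hc))]

theorem get?_setdefault_self (d : PySem.Dict Char Int) (k : Char) (v : Int) :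
    (d.setdefault k v).get? k = some (d.getD k v) := by
  by_cases h : d.contains k = true
  · unfold PySem.Dict.setdefault
    rw [if_pos h]
    rw [PySem.Dict.contains_eq_isSome_get?] at h
    cases hg : d.get? k with
    | none => rw [hg] at h; simp at h
    | some w => simp [PySem.Dict.getD, hg]
  · unfold PySem.Dict.setdefault
    rw [if_neg h]
    have hfind : d.items.find? (fun p => p.1 == k) = none := by
      rw [List.find?_eq_none]
      intro p hp hb
      exact h (by unfold PySem.Dict.contains; exact List.any_eq_true.mpr ⟨p, hp, hb⟩)
    simp [PySem.Dict.get?, PySem.Dict.getD, List.find?_append, hfind]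

-- projections of the pair fold
theorem fill_fst : ∀ (l : List (Int × Char)) (p : PySem.Dict Char Int × PySem.Dict Char Int),
    (l.foldl foundingFill p).1 = l.foldl (fun d ic => d.setdefault ic.2 ic.1) p.1 := by
  intro l
  induction l with
  | nil => intro p; rfl
  | cons x t ih => intro p; simp only [List.foldl_cons, foundingFill]; exact ih _

theorem fill_snd : ∀ (l : List (Int × Char)) (p : PySem.Dict Char Int × PySem.Dict Char Int),
    (l.foldl foundingFill p).2 = l.foldl (fun d ic => d.insert ic.2 ic.1) p.2 := by
  intro l
  induction l with
  | nil => intro p; rfl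
  | cons x t ih => intro p; simp only [List.foldl_cons, foundingFill]; exact ih _

theorem firstD_spec : ∀ (s : List Char) (k : Nat) (d : PySem.Dict Char Int) (c : Char),
    ((PySem.List.enumerate s (k : Int)).foldl (fun d ic => d.setdefault ic.2 ic.1) d).get? c =
      (d.get? c).or (if c ∈ s then some ((k + firstN s c : Nat) : Int) else none) := by
  intro s
  induction s with
  | nil => intro k d c; simp [PySem.List.enumerate]
  | cons x t ih =>
    intro k d c
    rw [PySem.List.enumerate_cons, List.foldl_cons]
    have hk1 : ((k : Int) + 1) = ((k + 1 : Nat) : Int) := by push_cast; ring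
    rw [hk1, ih (k + 1) (d.setdefault x (k : Int)) c]
    by_cases hx : x = c
    · subst hx
      rw [get?_setdefault_self]
      cases hg : d.get? x with
      | some w => simp [PySem.Dict.getD, hg]
      | none =>
        simp [PySem.Dict.getD, hg, firstN]
    · rw [PySem.Dict.get?_setdefault_of_ne d (k : Int) (fun he => hx he.symm)]
      by_cases hm : c ∈ t
      · have : c ∈ x :: t := List.mem_cons_of_mem _ hm
        simp only [hm, if_pos this]
        have hfx : firstN (x :: t) c = firstN t c + 1 := by simp [firstN, hx]
        rw [hfx, show k + 1 + firstN t c = k + (firstN t c + 1) from by omega]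
        simp
      · have hnm : c ∉ x :: t := by
          intro hc; cases hc with | head => exact hx rfl | tail _ hc => exact hm hc
        simp [hm, hnm]

theorem lastD_spec : ∀ (s : List Char) (k : Nat) (d : PySem.Dict Char Int) (c : Char),
    ((PySem.List.enumerate s (k : Int)).foldl (fun d ic => d.insert ic.2 ic.1) d).get? c =
      if c ∈ s then some ((k + lastN s c : Nat) : Int) else d.get? c := by
  intro s
  induction s with
  | nil => intro k d c; simp [PySem.List.enumerate]
  | cons x t ih =>
    intro k d c
    rw [PySem.List.enumerate_cons, List.foldl_cons]
    have hk1 : ((k : Int) + 1) = ((k + 1 : Nat) : Int) := by push_cast; ring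
    rw [hk1, ih (k + 1) (d.insert x (k : Int)) c]
    by_cases hm : c ∈ t
    · have hc : c ∈ x :: t := List.mem_cons_of_mem _ hm
      have hlx : lastN (x :: t) c = lastN t c + 1 := by simp [lastN, hm]
      simp only [hm, if_pos hc, if_true, hlx]
      rw [show k + 1 + lastN t c = k + (lastN t c + 1) from by omega]
    · rw [if_neg hm, PySem.Dict.get?_insert]
      by_cases hx : c = x
      · subst hx
        have hc : c ∈ c :: t := List.mem_cons_self
        simp [hc, lastN, hm]
      · have hnm : c ∉ x :: t := by
          intro hc; cases hc with | head => exact hx rfl | tail _ hc => exact hm hc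
        simp [hnm, hx]

theorem keysD_spec : ∀ (s : List Char) (k : Nat) (d : PySem.Dict Char Int),
    ((PySem.List.enumerate s (k : Int)).foldl (fun d ic => d.setdefault ic.2 ic.1) d).keys =
      PySem.Set.update d.keys s := by
  intro s
  induction s with
  | nil => intro k d; simp [PySem.List.enumerate, PySem.Set.update]
  | cons x t ih =>
    intro k d
    rw [PySem.List.enumerate_cons, List.foldl_cons]
    have hk1 : ((k : Int) + 1) = ((k + 1 : Nat) : Int) := by push_cast; ring
    rw [hk1, ih (k + 1) (d.setdefault x (k : Int))]
    have : (d.setdefault x (k : Int)).keys = PySem.Set.add d.keys x := by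
      rw [PySem.Dict.keys_setdefault, contains_eq_keys_contains]
      unfold PySem.Set.add
      split_ifs <;> simp_all
    rw [this]
    rfl

-- the two dicts B builds
def fillB (b : String) : PySem.Dict Char Int × PySem.Dict Char Int :=
  (PySem.List.enumerate b.toList 0).foldl foundingFill (PySem.Dict.empty, PySem.Dict.empty)

theorem getD_first {b : String} {c : Char} (h : c ∈ b.toList) :
    (fillB b).1.getD c 0 = (firstN b.toList c : Int) := by
  show ((fillB b).1.get? c).getD 0 = (firstN b.toList c : Int)
  unfold fillB
  rw [fill_fst]
  rw [show (0 : Int) = ((0 : Nat) : Int) from rfl, firstD_spec b.toList 0 PySem.Dict.empty c]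
  simp [h]

theorem getD_last {b : String} {c : Char} (h : c ∈ b.toList) :
    (fillB b).2.getD c 0 = (lastN b.toList c : Int) := by
  show ((fillB b).2.get? c).getD 0 = (lastN b.toList c : Int)
  unfold fillB
  rw [fill_snd]
  rw [show (0 : Int) = ((0 : Nat) : Int) from rfl, lastD_spec b.toList 0 PySem.Dict.empty c]
  simp [h]

theorem keys_fillB (b : String) : (fillB b).1.keys = PySem.Set.ofList b.toList := by
  unfold fillB
  rw [fill_fst]
  rw [show (0 : Int) = ((0 : Nat) : Int) from rfl, keysD_spec b.toList 0 PySem.Dict.empty]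
  simp [PySem.Dict.keys_empty, PySem.Set.update, PySem.Set.ofList, PySem.Set.empty]

-- ---- dedup (first-occurrence) lemmas -----------------------------------------

theorem set_add_eq (s : PySem.Set Char) (x : Char) :
    PySem.Set.add s x = if s.contains x then s else s ++ [x] := rfl

theorem update_of_contains : ∀ (l : List Char) (acc : PySem.Set Char) (x : Char),
    x ∈ acc →
    PySem.Set.update acc l = PySem.Set.update acc (l.filter (· != x)) := by
  intro l
  induction l with
  | nil => intro acc x _; rfl
  | cons y t ih =>
    intro acc x hx
    by_cases hyx : y = x
    · subst hyx
      have hadd : PySem.Set.add acc y = acc := by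
        rw [set_add_eq, if_pos ((PySem.Set.contains_iff acc y).mpr hx)]
      have hfil : (y :: t).filter (· != y) = t.filter (· != y) := by simp
      rw [hfil]
      show PySem.Set.update (PySem.Set.add acc y) t = PySem.Set.update acc (t.filter (· != y))
      rw [hadd]
      exact ih acc y hx
    · have hbne : (y != x) = true := by simp [bne, hyx]
      have hfil : (y :: t).filter (· != x) = y :: t.filter (· != x) := by
        simp [hbne]
      rw [hfil]
      show PySem.Set.update (PySem.Set.add acc y) t =
        PySem.Set.update (PySem.Set.add acc y) (t.filter (· != x))
      exact ih (PySem.Set.add acc y) x ((PySem.Set.mem_add acc y x).mpr (Or.inl hx))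

theorem update_cons_notmem : ∀ (l : List Char) (acc : PySem.Set Char) (x : Char),
    (∀ y ∈ l, y ≠ x) →
    PySem.Set.update (x :: acc) l = x :: PySem.Set.update acc l := by
  intro l
  induction l with
  | nil => intro acc x _; rfl
  | cons y t ih =>
    intro acc x hl
    have hyx : y ≠ x := hl y List.mem_cons_self
    have hadd : PySem.Set.add (x :: acc) y = x :: PySem.Set.add acc y := by
      rw [set_add_eq, set_add_eq]
      have hcc : PySem.Set.contains (x :: acc) y = PySem.Set.contains acc y := by
        by_cases hm : y ∈ acc
        · rw [(PySem.Set.contains_iff _ y).mpr (List.mem_cons_of_mem _ hm),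
              (PySem.Set.contains_iff acc y).mpr hm]
        · have h1 : y ∉ x :: acc := by
            intro hc; cases hc with | head => exact hyx rfl | tail _ hc => exact hm hc
          rw [Bool.eq_false_iff.mpr (fun hc => h1 ((PySem.Set.contains_iff _ y).mp hc)),
              Bool.eq_false_iff.mpr (fun hc => hm ((PySem.Set.contains_iff acc y).mp hc))]
      rw [hcc]
      split_ifs <;> simp
    show PySem.Set.update (PySem.Set.add (x :: acc) y) t = x :: PySem.Set.update (PySem.Set.add acc y) t
    rw [hadd]
    exact ih (PySem.Set.add acc y) x (fun y hy => hl y (List.mem_cons_of_mem _ hy))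

theorem ofList_cons_eq (x : Char) (l : List Char) :
    PySem.Set.ofList (x :: l) = x :: PySem.Set.ofList (l.filter (· != x)) := by
  have h1 : PySem.Set.ofList (x :: l) = PySem.Set.update [x] l := by
    simp [PySem.Set.ofList, PySem.Set.update, PySem.Set.empty, PySem.Set.add, List.foldl_cons]
  rw [h1, update_of_contains l [x] x (List.mem_singleton.mpr rfl)]
  have hfil : ∀ y ∈ l.filter (· != x), y ≠ x := by
    intro y hy
    have := List.of_mem_filter hy
    simpa [bne] using this
  have := update_cons_notmem (l.filter (· != x)) [] x hfil
  simpa [PySem.Set.update, PySem.Set.ofList, PySem.Set.empty] using this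

-- ---- A's fold: duplicates are no-ops -----------------------------------------

theorem step_mono (b m : String) (c : Char) :
    PySem.Str.len m ≤ PySem.Str.len (foundingStep b m c) := by
  rw [foundingStep_eq]
  split_ifs with h
  · exact le_of_lt h.1
  · exact le_refl _

theorem step_fixed {b m : String} {c : Char}
    (h : PySem.Str.len (segA b c) ≤ PySem.Str.len m ∨ PySem.Str.len (segA b c) ≤ 1) :
    foundingStep b m c = m := by
  rw [foundingStep_eq]
  rw [if_neg]
  intro ⟨h1, h2⟩
  rcases h with h | h <;> omega

theorem step_after (b m : String) (c : Char) :
    PySem.Str.len (segA b c) ≤ PySem.Str.len (foundingStep b m c) ∨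
    PySem.Str.len (segA b c) ≤ 1 := by
  rw [foundingStep_eq]
  split_ifs with h
  · exact Or.inl (le_refl _)
  · rcases not_and_or.mp h with h1 | h1
    · exact Or.inl (le_of_not_gt h1)
    · exact Or.inr (le_of_not_gt h1)

theorem fold_filter (b : String) : ∀ (l : List Char) (m : String) (c : Char),
    (PySem.Str.len (segA b c) ≤ PySem.Str.len m ∨ PySem.Str.len (segA b c) ≤ 1) →
    l.foldl (foundingStep b) m = (l.filter (· != c)).foldl (foundingStep b) m := by
  intro l
  induction l with
  | nil => intro m c _; rfl
  | cons y t ih =>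
    intro m c hc
    by_cases hyc : y = c
    · subst hyc
      rw [List.filter_cons_of_neg (by simp), List.foldl_cons, step_fixed hc]
      exact ih m y hc
    · rw [List.filter_cons_of_pos (by simp [bne, hyc]), List.foldl_cons, List.foldl_cons]
      apply ih
      rcases hc with h | h
      · exact Or.inl (le_trans h (step_mono b m y))
      · exact Or.inr h

theorem fold_dedup (b : String) : ∀ (n : Nat) (l : List Char) (m : String), l.length ≤ n →
    (PySem.Set.ofList l).foldl (foundingStep b) m = l.foldl (foundingStep b) m := by
  intro n
  induction n with
  | zero =>
    intro l m hl
    have : l = [] := List.eq_nil_of_length_eq_zero (Nat.le_zero.mp hl)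
    subst this; rfl
  | succ n ih =>
    intro l m hl
    cases l with
    | nil => rfl
    | cons x t =>
      rw [ofList_cons_eq, List.foldl_cons, List.foldl_cons]
      have hlen : (t.filter (· != x)).length ≤ n :=
        le_trans (List.length_filter_le _ _) (by simpa using hl)
      rw [ih (t.filter (· != x)) (foundingStep b m x) hlen]
      exact (fold_filter b t (foundingStep b m x) x (step_after b m x)).symm

-- ---- B's fold tracks A's fold ------------------------------------------------

theorem best_step_eq {b : String} {c : Char} (h : c ∈ b.toList) (st : Int × String) :
    foundingBest b (fillB b) st c =
      if (lastN b.toList c : Int) - (firstN b.toList c : Int) + 1 > st.1 then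
        ((lastN b.toList c : Int) - (firstN b.toList c : Int) + 1, segC b c)
      else st := by
  unfold foundingBest
  rw [getD_first h, getD_last h]
  rfl

theorem best_fold (b : String) : ∀ (l : List Char), (∀ c ∈ l, c ∈ b.toList) → ∀ (m : String),
    l.foldl (foundingBest b (fillB b)) (max 1 (PySem.Str.len m), m) =
      (max 1 (PySem.Str.len (l.foldl (foundingStep b) m)), l.foldl (foundingStep b) m) := by
  intro l
  induction l with
  | nil => intro _ m; rfl
  | cons c t ih =>
    intro hmem m
    have hc : c ∈ b.toList := hmem c List.mem_cons_self
    have ht : ∀ x ∈ t, x ∈ b.toList := fun x hx => hmem x (List.mem_cons_of_mem _ hx)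
    rw [List.foldl_cons, List.foldl_cons, best_step_eq hc]
    have hlen : PySem.Str.len (segA b c) =
        (lastN b.toList c : Int) - (firstN b.toList c : Int) + 1 := by
      rw [segA_eq_segC hc]; exact len_segC hc
    by_cases hcond : (lastN b.toList c : Int) - (firstN b.toList c : Int) + 1 >
        max 1 (PySem.Str.len m)
    · rw [if_pos hcond]
      have hstep : foundingStep b m c = segC b c := by
        rw [foundingStep_eq, if_pos (by rw [hlen]; constructor <;> omega), segA_eq_segC hc]
      rw [hstep]
      have hmax : max 1 (PySem.Str.len (segC b c)) =
          (lastN b.toList c : Int) - (firstN b.toList c : Int) + 1 := by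
        rw [len_segC hc]; omega
      rw [← hmax]
      exact ih ht (segC b c)
    · rw [if_neg hcond]
      have hstep : foundingStep b m c = m := by
        rw [foundingStep_eq, if_neg]
        intro ⟨h1, h2⟩
        rw [hlen] at h1 h2
        omega
      rw [hstep]
      exact ih ht m

-- ===== VERDICT (by name: the statement is the Claim_ definition above) =====
theorem founding_spec : Claim_equal_founding := by
  intro b _
  unfold Spec_founding founding founding_alt
  show List.foldl (foundingStep b) "" b.toList =
    (List.foldl (foundingBest b (fillB b)) (1, "") (fillB b).1.keys).2
  rw [keys_fillB]
  have hinit : ((1 : Int), ("" : String)) = (max 1 (PySem.Str.len ""), "") := by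
    simp [PySem.Str.len]
  rw [hinit]
  rw [best_fold b (PySem.Set.ofList b.toList)
        (fun c hc => (PySem.Set.mem_ofList b.toList c).mp hc) ""]
  rw [fold_dedup b b.toList.length b.toList "" (le_refl _)]
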